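-- pv_equiv track=rewrite | github.com/evga7/Algorithm-practice | 프로그래머스/0/181893. 배열 조각하기/배열 조각하기.py | solution
-- ===== SOURCE A (Python) =====
-- def solution(arr, query):
--     op=0
--     for cur in query:
--         if op:
--             arr=arr[cur:]
--         else:
--             arr=arr[:cur+1]
--         op=1-op
--     return arr
-- ===== SOURCE B (Python) =====
-- def solution(arr, query):
--     # Track the current window [lo, hi) over the original arr and slice once at the end.
--     lo, hi = 0, len(arr)
--     op = 0
--     for cur in query:
--         n = hi - lo
--         if op:
--             s = cur + n if cur < 0 else cur
--             s = 0 if s < 0 else (n if s > n else s)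
--             lo += s
--         else:
--             e = cur + 1
--             e = e + n if e < 0 else e
--             e = 0 if e < 0 else (n if e > n else e)
--             hi = lo + e
--         op = 1 - op
--     return arr[lo:hi]
-- ===== Notes on version B (the rewrite author's own statement) =====
-- stated objective: alternative
-- what changed: Instead of materializing a new list slice for every query, B folds the queries into a pair of window indices (lo, hi) with explicit Python-slice clamping and slices the original array once at the end.
import Mathlib
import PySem

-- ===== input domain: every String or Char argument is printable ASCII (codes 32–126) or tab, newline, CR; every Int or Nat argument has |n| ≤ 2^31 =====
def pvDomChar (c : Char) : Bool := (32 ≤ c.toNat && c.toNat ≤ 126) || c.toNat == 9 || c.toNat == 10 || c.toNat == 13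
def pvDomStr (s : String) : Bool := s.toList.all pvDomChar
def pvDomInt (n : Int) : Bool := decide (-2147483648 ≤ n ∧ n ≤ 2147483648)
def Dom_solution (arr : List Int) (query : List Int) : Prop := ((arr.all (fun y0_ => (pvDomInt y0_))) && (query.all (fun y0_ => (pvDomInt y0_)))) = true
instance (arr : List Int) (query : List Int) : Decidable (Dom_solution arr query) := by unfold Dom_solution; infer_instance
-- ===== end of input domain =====

-- B tracks the current window as [lo, hi) index bounds over the original list and slices once
-- at the end, instead of A's materializing a new slice per query (objective: alternative).


-- ===== PORT A =====
-- A: repeatedly reslice the list itself, alternating arr[:cur+1] / arr[cur:].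
def stepA (st : List Int × Int) (cur : Int) : List Int × Int :=
  if st.2 ≠ 0 then
    (PySem.List.slice st.1 (some cur) none, 1 - st.2)
  else
    (PySem.List.slice st.1 none (some (cur + 1)), 1 - st.2)

def solution (arr : List Int) (query : List Int) : List Int :=
  (query.foldl stepA (arr, 0)).1

-- ===== PORT B =====
-- B: fold the queries into window bounds (lo, hi), mirroring Python slice clamping, then slice once.
def stepB (st : Int × Int × Int) (cur : Int) : Int × Int × Int :=
  let lo := st.1
  let hi := st.2.1
  let op := st.2.2
  let n := hi - lo
  if op ≠ 0 then
    let s := if cur < 0 then cur + n else cur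
    let s := if s < 0 then 0 else if s > n then n else s
    (lo + s, hi, 1 - op)
  else
    let e := cur + 1
    let e := if e < 0 then e + n else e
    let e := if e < 0 then 0 else if e > n then n else e
    (lo, lo + e, 1 - op)

def solution_alt (arr : List Int) (query : List Int) : List Int :=
  let st := query.foldl stepB (0, (arr.length : Int), 0)
  PySem.List.slice arr (some st.1) (some st.2.1)

-- ===== PRECONDITION & SPEC =====
def Spec_solution (arr : List Int) (query : List Int) (out : List Int) : Prop := out = solution_alt arr query
instance (arr : List Int) (query : List Int) (out : List Int) : Decidable (Spec_solution arr query out) := by unfold Spec_solution; infer_instance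

-- ===== CLAIM (what is proved, stated in full; the proofs are below) =====
def Claim_equal_solution : Prop := ∀ (arr : List Int) (query : List Int), Dom_solution arr query → Spec_solution arr query (solution arr query)

-- ===== LEMMAS AND PROOFS =====

-- PySem's slice clamp, cast to Int, as plain conditionals (so omega can use it).
theorem clampIdx_cast (n : Nat) (k : Int) :
    ((PySem.List.clampIdx n k : Nat) : Int)
      = if k < 0 then (if (n:Int) + k < 0 then 0 else (n:Int) + k)
        else if k < (n:Int) then k else (n:Int) := by
  simp only [PySem.List.clampIdx]
  split_ifs <;> omega

-- window w = (arr.drop a).take m ; dropping k elements moves the left bound.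
theorem window_drop (arr : List Int) (a m k : Nat) :
    (((arr.drop a).take m).drop k) = (arr.drop (a + k)).take (m - k) := by
  rw [List.drop_take, List.drop_drop]

theorem window_take (arr : List Int) (a m k : Nat) (hk : k ≤ m) :
    (((arr.drop a).take m).take k) = (arr.drop a).take k := by
  rw [List.take_take, Nat.min_eq_left hk]

theorem window_eq (arr : List Int) (a b c d : Nat) (h1 : a = c) (h2 : b = d) :
    (arr.drop a).take b = (arr.drop c).take d := by
  rw [h1, h2]

theorem window_len (arr : List Int) (lo hi : Int) (h0 : 0 ≤ lo) (_h1 : lo ≤ hi)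
    (h2 : hi ≤ (arr.length : Int)) :
    ((arr.drop lo.toNat).take (hi - lo).toNat).length = (hi - lo).toNat := by
  simp
  omega

-- One step: A's resliced list is the window cut out by B's updated bounds; the bounds stay in range.
theorem step_sim (arr : List Int) (lo hi op cur : Int) (h0 : 0 ≤ lo) (h1 : lo ≤ hi)
    (h2 : hi ≤ (arr.length : Int)) :
    stepA ((arr.drop lo.toNat).take (hi - lo).toNat, op) cur
        = ((arr.drop (stepB (lo, hi, op) cur).1.toNat).take
            ((stepB (lo, hi, op) cur).2.1 - (stepB (lo, hi, op) cur).1).toNat,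
           (stepB (lo, hi, op) cur).2.2)
      ∧ 0 ≤ (stepB (lo, hi, op) cur).1
      ∧ (stepB (lo, hi, op) cur).1 ≤ (stepB (lo, hi, op) cur).2.1
      ∧ (stepB (lo, hi, op) cur).2.1 ≤ (arr.length : Int) := by
  by_cases hop : op ≠ 0
  · -- odd step: A does arr[cur:], B moves lo
    have hc := clampIdx_cast (hi - lo).toNat cur
    simp only [stepA, stepB]
    rw [if_pos hop, if_pos hop]
    try dsimp only
    rw [PySem.List.slice_some_none, window_len arr lo hi h0 h1 h2, window_drop]
    refine ⟨Prod.ext ?_ rfl, ?_, ?_, ?_⟩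
    · exact window_eq arr _ _ _ _ (by split_ifs at hc ⊢ <;> omega)
        (by split_ifs at hc ⊢ <;> omega)
    all_goals split_ifs at hc ⊢ <;> omega
  · -- even step: A does arr[:cur+1], B moves hi
    have hc := clampIdx_cast (hi - lo).toNat (cur + 1)
    simp only [stepA, stepB]
    rw [if_neg hop, if_neg hop]
    try dsimp only
    have hsl : PySem.List.slice ((arr.drop lo.toNat).take (hi - lo).toNat) none (some (cur + 1))
        = ((arr.drop lo.toNat).take (hi - lo).toNat).take
            (PySem.List.clampIdx ((arr.drop lo.toNat).take (hi - lo).toNat).length (cur + 1)) := rfl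
    rw [hsl, window_len arr lo hi h0 h1 h2,
        window_take _ _ _ _ (by split_ifs at hc ⊢ <;> omega)]
    refine ⟨Prod.ext ?_ rfl, ?_, ?_, ?_⟩
    · exact window_eq arr _ _ _ _ rfl (by split_ifs at hc ⊢ <;> omega)
    all_goals split_ifs at hc ⊢ <;> omega

-- Loop invariant, by induction on the query list.
theorem loop_sim (arr : List Int) (q : List Int) : ∀ (lo hi op : Int),
    0 ≤ lo → lo ≤ hi → hi ≤ (arr.length : Int) →
    (q.foldl stepA ((arr.drop lo.toNat).take (hi - lo).toNat, op))
        = ((arr.drop (q.foldl stepB (lo, hi, op)).1.toNat).take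
            ((q.foldl stepB (lo, hi, op)).2.1 - (q.foldl stepB (lo, hi, op)).1).toNat,
           (q.foldl stepB (lo, hi, op)).2.2)
      ∧ 0 ≤ (q.foldl stepB (lo, hi, op)).1
      ∧ (q.foldl stepB (lo, hi, op)).1 ≤ (q.foldl stepB (lo, hi, op)).2.1
      ∧ (q.foldl stepB (lo, hi, op)).2.1 ≤ (arr.length : Int) := by
  induction q with
  | nil =>
      intro lo hi op h0 h1 h2
      exact ⟨rfl, h0, h1, h2⟩
  | cons cur q ih =>
      intro lo hi op h0 h1 h2
      obtain ⟨heq, b0, b1, b2⟩ := step_sim arr lo hi op cur h0 h1 h2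
      simp only [List.foldl_cons, heq]
      simpa only [Prod.mk.eta] using ih _ _ _ b0 b1 b2

-- ===== VERDICT (by name: the statement is the Claim_ definition above) =====
theorem solution_spec : Claim_equal_solution := by
  intro arr query _
  unfold Spec_solution solution solution_alt
  have h := loop_sim arr query 0 (arr.length : Int) 0 (by omega) (by omega) (by omega)
  have hwin0 : (arr.drop (0:Int).toNat).take ((arr.length : Int) - 0).toNat = arr := by
    simp
  rw [hwin0] at h
  obtain ⟨h1, hr0, hr1, hr2⟩ := h
  simp only [h1]
  rw [PySem.List.slice_of_nonneg arr hr0 (by omega) (by omega) hr2]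
  congr 1
  omega
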